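-- pv_equiv track=rewrite | github.com/abhinavbhandari/affinity_algorithms | affinity_algorithms/utils/subreddinfo.py | build_intersection_matrix_of_subreddits
-- ===== SOURCE A (Python) =====
-- def calculate_intersection(intersection_list):
--     intersection_keys = set()
--     for ij in intersection_list:
--         if len(intersection_keys) == 0:
--             intersection_keys = set(ij)
--         else:
--             intersection_keys = intersection_keys.union(set(ij))
--     return intersection_keys
--
-- def build_intersection_matrix_of_subreddits(sub_count_list, top_sub_n=2000):
--     sorted_keys = []
--     for sub_counts in sub_count_list:
--         sorted_keys.append(set(sorted(sub_counts, key=lambda x: sub_counts[x], reverse=True)[:top_sub_n]))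
--
--     int_list = []
--     for i, s_key in enumerate(sorted_keys):
--         temp_key_list = []
--         temp_key_list.extend(sorted_keys[:i])
--         temp_key_list.extend(sorted_keys[i+1:])
--         temp_key_set = calculate_intersection(temp_key_list)
--         sub_set = set(s_key)
--         int_count = len(sub_set.intersection(temp_key_set))
--         int_list.append(int_count)
--     return int_list
-- ===== SOURCE B (Python) =====
-- def build_intersection_matrix_of_subreddits(sub_count_list, top_sub_n=2000):
--     # One pass: a key of set i lies in the union of the other sets iff its
--     # global frequency across all sets is at least 2.
--     key_sets = [set(sorted(sc, key=lambda x: sc[x], reverse=True)[:top_sub_n])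
--                 for sc in sub_count_list]
--     freq = {}
--     for ks in key_sets:
--         for k in ks:
--             freq[k] = freq.get(k, 0) + 1
--     return [sum(1 for k in ks if freq[k] >= 2) for ks in key_sets]
-- ===== Notes on version B (the rewrite author's own statement) =====
-- stated objective: faster
-- what changed: Instead of re-building the union of all the other key sets for every index i (a quadratic loop of set unions), B counts each key's global frequency across all sets once and, per set, counts its keys with frequency >= 2.
import Mathlib
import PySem

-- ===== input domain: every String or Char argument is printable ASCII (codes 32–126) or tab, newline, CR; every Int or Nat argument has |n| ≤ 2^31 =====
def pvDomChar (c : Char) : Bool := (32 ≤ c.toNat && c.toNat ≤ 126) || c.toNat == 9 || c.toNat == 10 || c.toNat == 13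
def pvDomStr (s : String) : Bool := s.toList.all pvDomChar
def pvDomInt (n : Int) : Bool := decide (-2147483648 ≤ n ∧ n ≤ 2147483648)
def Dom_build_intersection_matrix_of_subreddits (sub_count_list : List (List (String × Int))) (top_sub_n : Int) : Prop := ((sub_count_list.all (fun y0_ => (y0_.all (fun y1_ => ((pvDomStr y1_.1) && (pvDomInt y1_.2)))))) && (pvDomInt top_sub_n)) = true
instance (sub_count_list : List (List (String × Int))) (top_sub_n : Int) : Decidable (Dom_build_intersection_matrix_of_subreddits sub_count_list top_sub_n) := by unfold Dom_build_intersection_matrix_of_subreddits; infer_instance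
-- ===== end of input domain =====

-- B replaces A's quadratic "re-union all the other sets for every index i" loop by one
-- global key-frequency counter: a key of set i lies in some other set iff its frequency is ≥ 2.

-- ===== PORT A =====
-- Each Python dict parameter is built from its association list by insertion (overwrite keeps position).
def pvDictOf (ps : List (String × Int)) : PySem.Dict String Int :=
  ps.foldl (fun d kv => d.insert kv.1 kv.2) PySem.Dict.empty

def calculate_intersection (intersection_list : List (PySem.Set String)) : PySem.Set String :=
  intersection_list.foldl
    (fun intersection_keys ij =>
      if PySem.Set.len intersection_keys == 0 then PySem.Set.ofList ij
      else PySem.Set.union intersection_keys (PySem.Set.ofList ij))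
    PySem.Set.empty

def build_intersection_matrix_of_subreddits (sub_count_list : List (List (String × Int))) (top_sub_n : Int) : List Int :=
  let sorted_keys : List (PySem.Set String) :=
    sub_count_list.foldl
      (fun acc sub_counts =>
        acc ++ [PySem.Set.ofList (PySem.List.slice
          (PySem.List.sorted (pvDictOf sub_counts).keys
            (fun x => (pvDictOf sub_counts).getD x 0) true) none (some top_sub_n))])
      []
  (PySem.List.enumerate sorted_keys).foldl
    (fun int_list p =>
      let temp_key_list :=
        PySem.List.slice sorted_keys none (some p.1) ++
        PySem.List.slice sorted_keys (some (p.1 + 1)) none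
      let temp_key_set := calculate_intersection temp_key_list
      let sub_set := PySem.Set.ofList p.2
      int_list ++ [((PySem.Set.inter sub_set temp_key_set).length : Int)])
    []

-- ===== PORT B =====
def build_intersection_matrix_of_subreddits_alt (sub_count_list : List (List (String × Int))) (top_sub_n : Int) : List Int :=
  let key_sets : List (PySem.Set String) :=
    sub_count_list.map (fun sc =>
      PySem.Set.ofList (PySem.List.slice
        (PySem.List.sorted (pvDictOf sc).keys
          (fun x => (pvDictOf sc).getD x 0) true) none (some top_sub_n)))
  let freq : PySem.Dict String Int :=
    key_sets.foldl (fun f ks => ks.foldl (fun f k => f.modify k 0 (· + 1)) f) PySem.Dict.empty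
  key_sets.map (fun ks => ((ks.filter (fun k => decide (2 ≤ freq.getD k 0))).length : Int))

-- ===== PRECONDITION & SPEC =====
def Spec_build_intersection_matrix_of_subreddits (sub_count_list : List (List (String × Int))) (top_sub_n : Int) (out : List Int) : Prop := out = build_intersection_matrix_of_subreddits_alt sub_count_list top_sub_n
instance (sub_count_list : List (List (String × Int))) (top_sub_n : Int) (out : List Int) : Decidable (Spec_build_intersection_matrix_of_subreddits sub_count_list top_sub_n out) := by unfold Spec_build_intersection_matrix_of_subreddits; infer_instance

-- ===== CLAIM (what is proved, stated in full; the proofs are below) =====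
def Claim_equal_build_intersection_matrix_of_subreddits : Prop := ∀ (sub_count_list : List (List (String × Int))) (top_sub_n : Int), Dom_build_intersection_matrix_of_subreddits sub_count_list top_sub_n → Spec_build_intersection_matrix_of_subreddits sub_count_list top_sub_n (build_intersection_matrix_of_subreddits sub_count_list top_sub_n)

-- ===== LEMMAS AND PROOFS =====

-- Membership in A's running union: x is in the fold iff it is in the accumulator or in some set of the list.
lemma mem_calc_foldl (l : List (PySem.Set String)) (acc : PySem.Set String) (x : String) :
    x ∈ l.foldl
      (fun intersection_keys ij =>
        if PySem.Set.len intersection_keys == 0 then PySem.Set.ofList ij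
        else PySem.Set.union intersection_keys (PySem.Set.ofList ij)) acc ↔
    x ∈ acc ∨ ∃ s ∈ l, x ∈ s := by
  induction l generalizing acc with
  | nil => simp
  | cons hd tl ih =>
    simp only [List.foldl_cons, ih]
    have hmem : ∀ y, (y ∈ if (PySem.Set.len acc == 0) = true then PySem.Set.ofList hd
        else PySem.Set.union acc (PySem.Set.ofList hd)) ↔ y ∈ acc ∨ y ∈ hd := by
      intro y
      by_cases h : (PySem.Set.len acc == 0) = true
      · have hacc : acc = [] := by simpa [PySem.Set.len] using h
        simp [hacc, PySem.Set.mem_ofList]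
      · have hacc : ¬acc = [] := by simpa [PySem.Set.len] using h
        simp [hacc, PySem.Set.mem_union, PySem.Set.mem_ofList]
    rw [hmem]
    constructor
    · rintro ((h | h) | ⟨s, hs, hxs⟩)
      · exact Or.inl h
      · exact Or.inr ⟨hd, List.mem_cons_self, h⟩
      · exact Or.inr ⟨s, List.mem_cons_of_mem _ hs, hxs⟩
    · rintro (h | ⟨s, hs, hxs⟩)
      · exact Or.inl (Or.inl h)
      · rcases List.mem_cons.mp hs with rfl | hs
        · exact Or.inl (Or.inr hxs)
        · exact Or.inr ⟨s, hs, hxs⟩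

lemma mem_calculate_intersection (l : List (PySem.Set String)) (x : String) :
    x ∈ calculate_intersection l ↔ ∃ s ∈ l, x ∈ s := by
  unfold calculate_intersection
  rw [mem_calc_foldl]
  simp [PySem.Set.empty]

-- Flattening a list of duplicate-free sets: the count of x is the number of sets containing x.
lemma count_flatten (L : List (PySem.Set String)) (hN : ∀ s ∈ L, s.Nodup) (x : String) :
    L.flatten.count x = L.countP (fun s => decide (x ∈ s)) := by
  induction L with
  | nil => simp
  | cons hd tl ih =>
    simp only [List.flatten_cons, List.count_append, List.countP_cons]
    rw [ih (fun s hs => hN s (List.mem_cons_of_mem _ hs))]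
    by_cases hx : x ∈ hd
    · rw [List.count_eq_one_of_mem (hN hd List.mem_cons_self) hx]
      simp [hx, Nat.add_comm]
    · rw [List.count_eq_zero.mpr hx]
      simp [hx]

-- The core counting fact: at position n of L, A's per-row count equals B's per-row count.
lemma row_eq (L : List (PySem.Set String)) (hN : ∀ s ∈ L, s.Nodup) (n : Nat) (hn : n < L.length) :
    ((PySem.Set.inter (PySem.Set.ofList L[n])
        (calculate_intersection (L.take n ++ L.drop (n + 1)))).length : Int)
      = ((L[n].filter (fun k => decide (2 ≤
          (L.foldl (fun f ks => ks.foldl (fun f k => f.modify k 0 (· + 1)) f)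
            (PySem.Dict.empty : PySem.Dict String Int)).getD k 0))).length : Int) := by
  have hfreq : (L.foldl (fun f ks => ks.foldl (fun f k => f.modify k 0 (· + 1)) f)
      (PySem.Dict.empty : PySem.Dict String Int)) = PySem.Dict.counter L.flatten := by
    rw [PySem.Dict.counter_eq_foldl, List.foldl_flatten]
  rw [hfreq, PySem.Set.ofList_eq_self_of_nodup _ (hN _ (L.getElem_mem hn))]
  unfold PySem.Set.inter
  rw [← List.countP_eq_length_filter, ← List.countP_eq_length_filter]
  congr 1
  apply List.countP_congr
  intro k hk
  rw [PySem.Set.contains_iff, mem_calculate_intersection, decide_eq_true_iff,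
      PySem.Dict.getD_counter, count_flatten L hN k]
  have hsplit : L.countP (fun s => decide (k ∈ s))
      = (L.take n ++ L.drop (n + 1)).countP (fun s => decide (k ∈ s)) + 1 := by
    conv_lhs => rw [← List.take_append_drop n L, List.drop_eq_getElem_cons hn]
    simp only [List.countP_append, List.countP_cons, decide_eq_true_eq]
    simp [hk]
    omega
  rw [hsplit]
  rw [show (∃ s ∈ L.take n ++ L.drop (n + 1), k ∈ s) ↔
      0 < (L.take n ++ L.drop (n + 1)).countP (fun s => decide (k ∈ s)) by
    rw [List.countP_pos_iff]; simp]
  push_cast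
  omega

-- The whole second half of both programs, over an arbitrary common key_sets list L.
lemma main_bridge (L : List (PySem.Set String)) (hN : ∀ s ∈ L, s.Nodup) :
    (PySem.List.enumerate L).foldl
      (fun int_list p =>
        int_list ++ [((PySem.Set.inter (PySem.Set.ofList p.2)
          (calculate_intersection
            (PySem.List.slice L none (some p.1) ++
             PySem.List.slice L (some (p.1 + 1)) none))).length : Int)]) []
    = L.map (fun ks => ((ks.filter (fun k => decide (2 ≤
        (L.foldl (fun f ks => ks.foldl (fun f k => f.modify k 0 (· + 1)) f)
          (PySem.Dict.empty : PySem.Dict String Int)).getD k 0))).length : Int)) := by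
  rw [PySem.List.foldl_append_singleton_eq_map, List.nil_append]
  apply List.ext_getElem
  · simp [PySem.List.length_enumerate]
  · intro n h1 h2
    have hn : n < L.length := by
      simpa [PySem.List.length_enumerate] using h1
    simp only [List.getElem_map]
    rw [PySem.List.getElem_enumerate]
    simp only [zero_add]
    have hto : PySem.List.slice L none (some (n : Int)) = L.take n :=
      PySem.List.slice_to_natCast L n
    have hfrom : PySem.List.slice L (some ((n : Int) + 1)) none = L.drop (n + 1) := by
      have h : ((n : Int) + 1) = ((n + 1 : Nat) : Int) := by push_cast; ring
      rw [h, PySem.List.slice_from_natCast]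
    rw [hto, hfrom]
    exact row_eq L hN n hn

-- ===== VERDICT (by name: the statement is the Claim_ definition above) =====
theorem build_intersection_matrix_of_subreddits_spec : Claim_equal_build_intersection_matrix_of_subreddits := by
  intro scl top _hdom
  unfold Spec_build_intersection_matrix_of_subreddits
  unfold build_intersection_matrix_of_subreddits build_intersection_matrix_of_subreddits_alt
  dsimp only
  rw [PySem.List.foldl_append_singleton_eq_map (l := scl), List.nil_append]
  exact main_bridge
    (scl.map (fun sc =>
      PySem.Set.ofList (PySem.List.slice
        (PySem.List.sorted (pvDictOf sc).keys
          (fun x => (pvDictOf sc).getD x 0) true) none (some top))))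
    (by
      intro s hs
      obtain ⟨sc, _, rfl⟩ := List.mem_map.mp hs
      exact PySem.Set.nodup_ofList _)
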